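-- pv_equiv track=rewrite | github.com/CodeForContribute/Algos-DataStructures | TreeCodes/Summation/sumNodesk-th_level_string.py | sumKthLevel
-- ===== SOURCE A (Python) =====
-- def sumKthLevel(root, k):
--     if k < 0:
--         return
--     sum = 0
--     level = -1
--     l = len(root)
--     for i in range(l):
--         if root[i] == '(':
--             level += 1
--         elif root[i] == ')':
--             level -= 1
--         else:
--             if level == k:
--                 sum += (ord(root[i]) - ord('0'))
--
--     return sum
-- ===== SOURCE B (Python) =====
-- def sumKthLevel(root, k):
--     if k < 0:
--         return None
--     total = 0
--     for i, c in enumerate(root):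
--         if c not in '()':
--             pre = root[:i]
--             if pre.count('(') - pre.count(')') - 1 == k:
--                 total += ord(c) - ord('0')
--     return total
-- ===== Notes on version B (the rewrite author's own statement) =====
-- stated objective: alternative
-- what changed: Replaces A's single stateful scan carrying a running level counter by a stateless brute-force: for each non-parenthesis character independently, recount '(' and ')' in the prefix before it to compute its level; trades A's O(n) scan for an O(n^2) but state-free per-character computation.
import Mathlib
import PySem

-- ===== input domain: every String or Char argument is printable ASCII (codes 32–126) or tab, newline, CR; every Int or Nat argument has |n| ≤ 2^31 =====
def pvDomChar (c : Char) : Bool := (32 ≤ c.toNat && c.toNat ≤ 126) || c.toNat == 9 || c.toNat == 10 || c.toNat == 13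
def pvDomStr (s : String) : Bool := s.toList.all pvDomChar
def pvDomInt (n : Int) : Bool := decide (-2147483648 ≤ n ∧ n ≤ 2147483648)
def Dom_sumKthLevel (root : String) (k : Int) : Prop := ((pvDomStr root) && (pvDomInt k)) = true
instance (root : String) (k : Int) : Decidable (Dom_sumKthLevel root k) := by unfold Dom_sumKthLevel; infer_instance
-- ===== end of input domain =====

-- B drops A's running level counter: each non-parenthesis character's level is recomputed
-- independently by counting '(' and ')' in the prefix before it (alternative decomposition, O(n^2)).

-- ===== PORT A =====
-- A: one loop carrying mutable (sum, level), level starts at -1, branch chain per character.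
def sumKthLevel (root : String) (k : Int) : Option Int :=
  if k < 0 then none
  else
    let st := root.toList.foldl (fun (p : Int × Int) c =>
      if c = '(' then (p.1, p.2 + 1)
      else if c = ')' then (p.1, p.2 - 1)
      else if p.2 = k then (p.1 + ((c.toNat : Int) - 48), p.2)
      else p) ((0 : Int), (-1 : Int))
    some st.1

-- ===== PORT B =====
-- pre.count('(') - pre.count(')') from Source B (str.count of a single char = List.count; exact on all strings)
def cntB (pre : List Char) : Int := (pre.count '(' : Int) - (pre.count ')' : Int)

def sumKthLevel_alt (root : String) (k : Int) : Option Int :=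
  if k < 0 then none
  else
    let l := root.toList
    -- for i, c in enumerate(root): …  (root[:i] ported as l.take i; exact since 0 ≤ i ≤ len)
    some (l.zipIdx.foldl (fun (total : Int) (p : Char × Nat) =>
      if ¬(p.1 = '(') ∧ ¬(p.1 = ')') then
        if cntB (l.take p.2) - 1 = k then total + ((p.1.toNat : Int) - 48) else total
      else total) 0)

-- ===== PRECONDITION & SPEC =====
def Spec_sumKthLevel (root : String) (k : Int) (out : Option Int) : Prop := out = sumKthLevel_alt root k
instance (root : String) (k : Int) (out : Option Int) : Decidable (Spec_sumKthLevel root k out) := by unfold Spec_sumKthLevel; infer_instance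

-- ===== CLAIM (what is proved, stated in full; the proofs are below) =====
def Claim_equal_sumKthLevel : Prop := ∀ (root : String) (k : Int), Dom_sumKthLevel root k → Spec_sumKthLevel root k (sumKthLevel root k)

-- ===== LEMMAS AND PROOFS =====

-- common reference function: digit-sum of cs at target k, current level lvl
def FK (k : Int) : List Char → Int → Int
  | [], _ => 0
  | c :: cs, lvl =>
    if c = '(' then FK k cs (lvl + 1)
    else if c = ')' then FK k cs (lvl - 1)
    else (if lvl = k then ((c.toNat : Int) - 48) else 0) + FK k cs lvl

theorem keyA (k : Int) : ∀ (cs : List Char) (s lvl : Int),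
    (cs.foldl (fun (p : Int × Int) c =>
      if c = '(' then (p.1, p.2 + 1)
      else if c = ')' then (p.1, p.2 - 1)
      else if p.2 = k then (p.1 + ((c.toNat : Int) - 48), p.2)
      else p) (s, lvl)).1 = s + FK k cs lvl := by
  intro cs
  induction cs with
  | nil => intro s lvl; simp [FK]
  | cons c cs ih =>
    intro s lvl
    rw [List.foldl_cons]
    by_cases h1 : c = '('
    · subst h1; simp [FK, ih]
    · by_cases h2 : c = ')'
      · subst h2; simp [FK, ih]
      · by_cases h3 : lvl = k
        · simp only [if_neg h1, if_neg h2, ih, FK, if_pos h3]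
          ring
        · simp [FK, h1, h2, h3, ih]

theorem cntB_snoc (pre : List Char) (c : Char) :
    cntB (pre ++ [c]) = cntB pre + ((if c = '(' then 1 else 0) - (if c = ')' then 1 else 0)) := by
  simp only [cntB, List.count_append, List.count_singleton]
  by_cases h1 : c = '(' <;> by_cases h2 : c = ')' <;>
    simp_all [beq_iff_eq] <;> ring

theorem keyB (k : Int) (l : List Char) : ∀ (suf pre : List Char), l = pre ++ suf → ∀ (s : Int),
    (suf.zipIdx pre.length).foldl (fun (total : Int) (p : Char × Nat) =>
      if ¬(p.1 = '(') ∧ ¬(p.1 = ')') then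
        if cntB (l.take p.2) - 1 = k then total + ((p.1.toNat : Int) - 48) else total
      else total) s = s + FK k suf (cntB pre - 1) := by
  intro suf
  induction suf with
  | nil => intro pre _ s; simp [FK]
  | cons c cs ih =>
    intro pre hl s
    rw [List.zipIdx_cons, List.foldl_cons]
    have htake : l.take pre.length = pre := by
      rw [hl, List.take_left]
    have hl' : l = (pre ++ [c]) ++ cs := by simp [hl]
    have hlen : pre.length + 1 = (pre ++ [c]).length := by simp
    rw [htake, hlen, ih _ hl']
    by_cases h1 : c = '('
    · subst h1
      simp [FK, cntB_snoc]
    · by_cases h2 : c = ')'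
      · subst h2
        have hc : cntB (pre ++ [')']) = cntB pre - 1 := by
          rw [cntB_snoc]; simp; ring
        simp [FK, hc]
      · have hcnt : cntB (pre ++ [c]) = cntB pre := by rw [cntB_snoc]; simp [h1, h2]
        by_cases h3 : cntB pre - 1 = k
        · simp only [if_pos (show ¬c = '(' ∧ ¬c = ')' from ⟨h1, h2⟩), if_pos h3, hcnt,
            FK, if_neg h1, if_neg h2]
          ring
        · simp [FK, h1, h2, h3, hcnt]

-- ===== VERDICT (by name: the statement is the Claim_ definition above) =====
theorem sumKthLevel_spec : Claim_equal_sumKthLevel := by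
  intro root k _
  unfold Spec_sumKthLevel sumKthLevel sumKthLevel_alt
  by_cases hk : k < 0
  · simp [hk]
  · simp only [if_neg hk]
    have hA := keyA k root.toList 0 (-1)
    have hB := keyB k root.toList root.toList [] rfl 0
    rw [List.length_nil] at hB
    rw [hA, hB]
    norm_num [cntB]
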